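-- pv_equiv track=rewrite | github.com/zanagaivota/Fundamentos_de_Programacao-Projecto2 | Projecto2.py | e_conjunto_palavras
-- ===== SOURCE A (Python) =====
-- def valid_letter (letter):
--     """
--     caracter --> logico
--     """
--     # verifica se um caracter e uma letra maiuscula ou uma string vazia
--
--     valid_letters = ["","A","B","C","D","E","F","G","H","I","J","L","M","N","O","P","Q","R","S","T","U","V","X","Z","K","W","Y"]
--     return letter in valid_letters
--
-- def valid_letterSet(letterSet):
--     """
--     lista ou tuplo ou cadeia de caracteres --> logico
--     """
--     # verifica se os elementos de uma lista, tuplo ou cadeia de caracteres sao uma letra maiuscula ou uma string vazia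
--
--     letterSetLength = len(letterSet)
--     if letterSetLength == 0:
--         return True
--     else:
--         return  valid_letter(letterSet[0]) and valid_letterSet(letterSet[1:])
--
-- def e_palavra_potencial (potential_word):
--     """
--     universal --> logico
--     """
--
--     return isinstance(potential_word,str) and (potential_word == "" or valid_letterSet(potential_word))
--
-- def palavras_potenciais_iguais (potential_word1,potential_word2):
--     """
--     palavra_potencial x palavra_potencial --> logico
--     """
--
--     if not e_palavra_potencial(potential_word1) or not e_palavra_potencial(potential_word2):
--         raise ValueError ("palavras_potenciais_iguais: potential_word1 e potential_word2 tem de ser ambas palavra potencial.")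
--
--     return potential_word1 == potential_word2
--
-- def e_conjunto_palavras (wordSet):
--     """
--     universal --> logico
--     """
--
--     def testing_list_potential_words(wordSet):
--         # lista --> logico
--         # verifica se todos os elementos de uma lista sao palavra_potencial
--
--         if len(wordSet) == 0:
--             return True
--         else:
--             return e_palavra_potencial(wordSet[0]) and testing_list_potential_words(wordSet[1:])
--
--
--     def testing_equal_potential_words(wordSet):
--         # lista --> logico
--         # verifica se todos os elementos de uma lista com elementos do tipo palavra_potencial sao diferentes uns dos outros
--
--         if len(wordSet) <= 1:
--             return True
--         else:
--             num = len(wordSet)-1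
--             flag = True
--             i = 1
--             while i < num:
--                 index = 0
--                 for index in range(0,i):
--                     if palavras_potenciais_iguais(wordSet[i],wordSet[index]):
--                         flag = False
--                         break
--                 i = i + 1
--             return flag
--
--
--     if isinstance(wordSet,list):
--         if testing_list_potential_words(wordSet):
--             return testing_equal_potential_words(wordSet)
--
--     return False
-- ===== SOURCE B (Python) =====
-- VALID = set("ABCDEFGHIJKLMNOPQRSTUVWXYZ")
--
-- def e_conjunto_palavras(wordSet):
--     if not isinstance(wordSet, list):
--         return False
--     for w in wordSet:
--         if not isinstance(w, str) or not all(c in VALID for c in w):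
--             return False
--     return len(set(wordSet)) == len(wordSet)
-- ===== Notes on version B (the rewrite author's own statement) =====
-- stated objective: simpler
-- what changed: Replaces the recursive per-character/per-word validation and the quadratic nested index scan with one iterative pass plus a set-cardinality distinctness test, and fixes A's off-by-one that never compares the last element against the others.
-- intended difference: On lists of valid words whose only duplicate is the last element repeating an earlier one (e.g. ['A','B','A']), A returns True because its while loop stops at len-2 and never checks the last word, while B returns False, the intended answer for a set of distinct words. — e.g. on e_conjunto_palavras(["A", "B", "A"]): A returns true, B returns false
import Mathlib
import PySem

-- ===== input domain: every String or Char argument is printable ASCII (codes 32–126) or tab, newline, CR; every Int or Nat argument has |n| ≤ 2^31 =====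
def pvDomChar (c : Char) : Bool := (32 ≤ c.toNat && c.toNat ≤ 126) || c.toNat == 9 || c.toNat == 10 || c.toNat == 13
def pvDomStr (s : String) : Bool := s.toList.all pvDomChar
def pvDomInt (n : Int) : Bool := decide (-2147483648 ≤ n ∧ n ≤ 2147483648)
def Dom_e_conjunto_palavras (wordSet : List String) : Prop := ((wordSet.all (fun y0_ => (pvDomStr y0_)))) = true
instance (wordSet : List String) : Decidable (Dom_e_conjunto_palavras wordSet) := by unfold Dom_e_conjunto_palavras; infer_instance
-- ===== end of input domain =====

set_option maxHeartbeats 1000000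
set_option maxRecDepth 100000

-- B replaces A's recursive validation and quadratic nested scan by one iterative pass plus a
-- set-cardinality distinctness test; it fixes A's off-by-one (A never compares the last
-- element against the others), stated below as the intended difference D_.

-- ===== PORT A =====
def validLetter (letter : String) : Bool :=
  letter ∈ ["","A","B","C","D","E","F","G","H","I","J","L","M","N","O","P","Q","R","S","T","U","V","X","Z","K","W","Y"]

-- valid_letterSet on a string: s[0] is the one-character string, s[1:] the rest
def validLetterSet : List Char → Bool
  | [] => true
  | c :: rest => validLetter (String.ofList [c]) && validLetterSet rest

-- isinstance(potential_word, str) is always true under the List String typing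
def ePalavraPotencial (potentialWord : String) : Bool :=
  (potentialWord == "") || validLetterSet potentialWord.toList

-- palavras_potenciais_iguais: none = the ValueError raise
def palavrasPotenciaisIguais? (w1 w2 : String) : Option Bool :=
  if (!ePalavraPotencial w1) || (!ePalavraPotencial w2) then none
  else some (w1 == w2)

def testingListPotentialWords : List String → Bool
  | [] => true
  | w :: rest => ePalavraPotencial w && testingListPotentialWords rest

-- the inner 'for index in range(0,i)' with its break; flag is the running flag
def innerScan (ws : List String) (wi : String) : List Nat → Bool → Option Bool
  | [], flag => some flag
  | j :: rest, flag =>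
    match palavrasPotenciaisIguais? wi (ws.getD j "") with
    | none => none
    | some true => some false        -- flag = False; break
    | some false => innerScan ws wi rest flag

-- the outer 'while i < num' loop, i = 1,…,num-1
def testingEqualPotentialWords (ws : List String) : Option Bool :=
  if ws.length ≤ 1 then some true
  else
    let num := ws.length - 1
    (List.range' 1 (num - 1)).foldlM
      (fun flag i => innerScan ws (ws.getD i "") (List.range i) flag) true

def e_conjunto_palavras (wordSet : List String) : Bool :=
  -- isinstance(wordSet, list) is always true under the typing
  if testingListPotentialWords wordSet then
    match testingEqualPotentialWords wordSet with
    | some b => b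
    | none => false   -- unreachable: the ValueError is guarded by testing_list_potential_words
  else false

-- ===== PORT B =====
def validChar (c : Char) : Bool := c ∈ "ABCDEFGHIJKLMNOPQRSTUVWXYZ".toList

def e_conjunto_palavras_alt (wordSet : List String) : Bool :=
  wordSet.all (fun w => w.toList.all validChar) &&
    ((PySem.Set.ofList wordSet).length == wordSet.length)

-- ===== PRECONDITION & SPEC =====
-- On lists of valid uppercase words whose only duplicate is the last element repeating an
-- earlier one, A returns True (its while loop stops at index len-2 and never checks the last
-- word) while B returns False, the intended answer for a set of distinct words.
def D_e_conjunto_palavras (wordSet : List String) : Prop :=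
  (wordSet.all (fun w => w.toList.all (fun c =>
      decide (c ∈ ['A','B','C','D','E','F','G','H','I','J','K','L','M','N','O','P','Q','R','S','T','U','V','W','X','Y','Z'])))) = true ∧
  wordSet.dropLast.Nodup ∧ wordSet.getLastD "" ∈ wordSet.dropLast

instance (wordSet : List String) : Decidable (D_e_conjunto_palavras wordSet) := by
  unfold D_e_conjunto_palavras; infer_instance

def Spec_e_conjunto_palavras (wordSet : List String) (out : Bool) : Prop :=
  ¬ D_e_conjunto_palavras wordSet → out = e_conjunto_palavras_alt wordSet
instance (wordSet : List String) (out : Bool) : Decidable (Spec_e_conjunto_palavras wordSet out) := by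
  unfold Spec_e_conjunto_palavras; infer_instance

def pvDiffWitness_e_conjunto_palavras : List String := ["A", "B", "A"]
def pvDiffWitnessOut_e_conjunto_palavras : Bool × Bool := (true, false)

-- ===== CLAIM (what is proved, stated in full; the proofs are below) =====
def Claim_unchanged_e_conjunto_palavras : Prop := ∀ (wordSet : List String), Dom_e_conjunto_palavras wordSet → Spec_e_conjunto_palavras wordSet (e_conjunto_palavras wordSet)
def Claim_changed_e_conjunto_palavras : Prop := Dom_e_conjunto_palavras (pvDiffWitness_e_conjunto_palavras) ∧ D_e_conjunto_palavras (pvDiffWitness_e_conjunto_palavras) ∧ e_conjunto_palavras (pvDiffWitness_e_conjunto_palavras) = pvDiffWitnessOut_e_conjunto_palavras.1 ∧ e_conjunto_palavras_alt (pvDiffWitness_e_conjunto_palavras) = pvDiffWitnessOut_e_conjunto_palavras.2 ∧ pvDiffWitnessOut_e_conjunto_palavras.1 ≠ pvDiffWitnessOut_e_conjunto_palavras.2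
def Claim_exact_e_conjunto_palavras : Prop := ∀ (wordSet : List String), Dom_e_conjunto_palavras wordSet → D_e_conjunto_palavras wordSet → e_conjunto_palavras wordSet ≠ e_conjunto_palavras_alt wordSet

-- ===== LEMMAS AND PROOFS =====

theorem validLetter_singleton (c : Char) :
    validLetter (String.ofList [c]) = validChar c := by
  simp only [validLetter, validChar]
  simp [String.ext_iff]
  rw [Bool.eq_iff_iff]
  simp only [Bool.or_eq_true, decide_eq_true_eq]
  tauto

theorem validLetterSet_eq (l : List Char) : validLetterSet l = l.all validChar := by
  induction l with
  | nil => rfl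
  | cons c rest ih => simp [validLetterSet, validLetter_singleton, ih]

theorem ePalavraPotencial_eq (w : String) :
    ePalavraPotencial w = w.toList.all validChar := by
  by_cases h : w = ""
  · simp [ePalavraPotencial, h]
  · simp [ePalavraPotencial, validLetterSet_eq, h]

theorem testingList_eq (ws : List String) :
    testingListPotentialWords ws = ws.all (fun w => w.toList.all validChar) := by
  induction ws with
  | nil => rfl
  | cons w rest ih => simp [testingListPotentialWords, ePalavraPotencial_eq, ih]

theorem palavras_some (w1 w2 : String) (h1 : ePalavraPotencial w1 = true)
    (h2 : ePalavraPotencial w2 = true) :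
    palavrasPotenciaisIguais? w1 w2 = some (w1 == w2) := by
  simp [palavrasPotenciaisIguais?, h1, h2]

theorem innerScan_eq (ws : List String) (wi : String) (js : List Nat) (flag : Bool)
    (hwi : ePalavraPotencial wi = true)
    (hjs : ∀ j ∈ js, ePalavraPotencial (ws.getD j "") = true) :
    innerScan ws wi js flag = some (flag && js.all (fun j => !(wi == ws.getD j ""))) := by
  induction js generalizing flag with
  | nil => simp [innerScan]
  | cons j rest ih =>
    have hj := hjs j (List.mem_cons_self ..)
    have hrest : ∀ j' ∈ rest, ePalavraPotencial (ws.getD j' "") = true := by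
      intro j' hm; exact hjs j' (List.mem_cons_of_mem _ hm)
    simp only [innerScan, palavras_some _ _ hwi hj, List.all_cons]
    cases (wi == ws.getD j "") <;> simp [ih flag hrest, List.getD]

theorem foldlM_eq_foldl (F : Bool → Nat → Option Bool) (G : Bool → Nat → Bool)
    (l : List Nat) (b : Bool) (h : ∀ i ∈ l, ∀ fl, F fl i = some (G fl i)) :
    l.foldlM F b = some (l.foldl G b) := by
  induction l generalizing b with
  | nil => rfl
  | cons i rest ih =>
    simp only [List.foldlM_cons, List.foldl_cons, h i (List.mem_cons_self ..)]
    exact ih _ (fun i' hm fl => h i' (List.mem_cons_of_mem _ hm) fl)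

theorem foldl_and_eq_all (p : Nat → Bool) (l : List Nat) (b : Bool) :
    l.foldl (fun fl i => fl && p i) b = (b && l.all p) := by
  induction l generalizing b with
  | nil => simp
  | cons i rest ih => simp [List.foldl_cons, ih, Bool.and_assoc]

theorem getD_valid (ws : List String)
    (hv : ws.all (fun w => w.toList.all validChar) = true) (j : Nat) :
    ePalavraPotencial (ws.getD j "") = true := by
  rw [ePalavraPotencial_eq]
  rcases h : ws[j]? with _ | w
  · simp [List.getD, h]
  · have hm : w ∈ ws := List.mem_of_getElem? h
    simp only [List.getD, h, Option.getD_some]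
    exact List.all_eq_true.mp hv w hm

theorem all_eq_nodup (ws : List String) (h2 : 2 ≤ ws.length) :
    ((List.range' 1 (ws.length - 1 - 1)).all (fun i =>
        (List.range i).all (fun j => !(ws.getD i "" == ws.getD j ""))))
      = decide ws.dropLast.Nodup := by
  rw [Bool.eq_iff_iff, decide_eq_true_iff, List.all_eq_true, List.nodup_iff_getElem?_ne_getElem?]
  constructor
  · intro h j i hji hi
    rw [List.length_dropLast] at hi
    have himem : i ∈ List.range' 1 (ws.length - 1 - 1) := by
      rw [List.mem_range'_1]; omega
    have hb := List.all_eq_true.mp (h i himem) j (by rw [List.mem_range]; omega)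
    intro hcontra
    rw [List.getElem?_dropLast, if_pos (by omega), List.getElem?_dropLast, if_pos hi] at hcontra
    simp only [List.getD_eq_getElem?_getD, Bool.not_eq_eq_eq_not, Bool.not_true, beq_eq_false_iff_ne,
      ne_eq] at hb
    exact hb (by rw [hcontra])
  · intro h i himem
    rw [List.mem_range'_1] at himem
    rw [List.all_eq_true]
    intro j hjmem
    rw [List.mem_range] at hjmem
    have hne := h j i (by omega) (by rw [List.length_dropLast]; omega)
    rw [List.getElem?_dropLast, if_pos (by omega), List.getElem?_dropLast, if_pos (by omega)] at hne
    rcases hj : ws[j]? with _ | wj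
    · rw [List.getElem?_eq_none_iff] at hj; omega
    rcases hi : ws[i]? with _ | wi
    · rw [List.getElem?_eq_none_iff] at hi; omega
    rw [hj, hi] at hne
    simp only [List.getD_eq_getElem?_getD, hi, hj, Option.getD_some, Bool.not_eq_eq_eq_not,
      Bool.not_true, beq_eq_false_iff_ne, ne_eq]
    intro hq; exact hne (by rw [hq])

theorem testingEqual_eq (ws : List String)
    (hv : ws.all (fun w => w.toList.all validChar) = true) :
    testingEqualPotentialWords ws = some (decide ws.dropLast.Nodup) := by
  rw [testingEqualPotentialWords]
  by_cases hlen : ws.length ≤ 1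
  · rw [if_pos hlen]
    have : ws.dropLast = [] := by
      rw [← List.length_eq_zero_iff, List.length_dropLast]
      omega
    simp [this]
  · rw [if_neg hlen]
    rw [foldlM_eq_foldl _
        (fun fl i => fl && (List.range i).all (fun j => !(ws.getD i "" == ws.getD j ""))) _ _
        (fun i _ fl => innerScan_eq ws (ws.getD i "") (List.range i) fl
          (getD_valid ws hv i) (fun j _ => getD_valid ws hv j))]
    rw [foldl_and_eq_all, Bool.true_and, all_eq_nodup ws (by omega)]

-- A computes: all words valid, and no duplicate among the first (len-1) elements
theorem a_char (ws : List String)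
    (hv : ws.all (fun w => w.toList.all validChar) = true) :
    e_conjunto_palavras ws = decide ws.dropLast.Nodup := by
  simp [e_conjunto_palavras, testingList_eq, hv, testingEqual_eq ws hv]

theorem a_char_false (ws : List String)
    (hv : ws.all (fun w => w.toList.all validChar) = false) :
    e_conjunto_palavras ws = false := by
  simp [e_conjunto_palavras, testingList_eq, hv]

theorem ofList_sublist (xs : List String) : (PySem.Set.ofList xs).Sublist xs := by
  induction xs using List.reverseRecOn with
  | nil => simp [PySem.Set.ofList_nil]
  | append_singleton ys x ih =>
    rw [PySem.Set.ofList_append_singleton, PySem.Set.add]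
    by_cases h : PySem.Set.contains (PySem.Set.ofList ys) x
    · simp only [h, if_true]
      exact ih.trans (List.sublist_append_left ys [x])
    · simp only [h]
      exact List.Sublist.append ih (List.Sublist.refl [x])

theorem ofList_len_iff (xs : List String) :
    ((PySem.Set.ofList xs).length == xs.length) = decide xs.Nodup := by
  rw [Bool.eq_iff_iff, beq_iff_eq, decide_eq_true_iff]
  constructor
  · intro h
    have := (ofList_sublist xs).eq_of_length h
    rw [← this]
    exact PySem.Set.nodup_ofList xs
  · intro h
    rw [PySem.Set.ofList_eq_self_of_nodup xs h]

theorem b_char (ws : List String) :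
    e_conjunto_palavras_alt ws
      = (ws.all (fun w => w.toList.all validChar) && decide ws.Nodup) := by
  rw [e_conjunto_palavras_alt, ofList_len_iff]

theorem validChar_eq (c : Char) :
    validChar c = decide (c ∈ ['A','B','C','D','E','F','G','H','I','J','K','L','M','N','O','P','Q','R','S','T','U','V','W','X','Y','Z']) := by
  have hL : "ABCDEFGHIJKLMNOPQRSTUVWXYZ".toList
      = ['A','B','C','D','E','F','G','H','I','J','K','L','M','N','O','P','Q','R','S','T','U','V','W','X','Y','Z'] := by
    decide
  simp [validChar, hL]

theorem valid_eq_D1 (ws : List String) :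
    ws.all (fun w => w.toList.all validChar)
      = ws.all (fun w => w.toList.all (fun c =>
          decide (c ∈ ['A','B','C','D','E','F','G','H','I','J','K','L','M','N','O','P','Q','R','S','T','U','V','W','X','Y','Z']))) := by
  rw [funext validChar_eq]

-- ===== VERDICT (by name: the statement is the Claim_ definition above) =====
theorem e_conjunto_palavras_spec : Claim_unchanged_e_conjunto_palavras := by
  intro ws _ hD
  rcases hvb : ws.all (fun w => w.toList.all validChar) with _ | _
  · rw [a_char_false ws hvb, b_char, hvb, Bool.false_and]
  · rw [a_char ws hvb, b_char, hvb, Bool.true_and]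
    have hD' : ¬ (ws.dropLast.Nodup ∧ ws.getLastD "" ∈ ws.dropLast) := by
      intro ⟨h1, h2⟩
      exact hD ⟨(valid_eq_D1 ws) ▸ hvb, h1, h2⟩
    induction ws using List.reverseRecOn with
    | nil => simp
    | append_singleton ys x _ =>
      rw [List.dropLast_concat] at hD' ⊢
      rw [List.getLastD_concat] at hD'
      rw [decide_eq_decide, ← List.concat_eq_append, List.nodup_concat]
      by_cases hn : ys.Nodup
      · have hx : x ∉ ys := fun hm => hD' ⟨hn, hm⟩
        exact iff_of_true hn ⟨hx, hn⟩
      · exact iff_of_false hn (fun h => hn h.2)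

theorem e_conjunto_palavras_changed : Claim_changed_e_conjunto_palavras := by
  unfold Claim_changed_e_conjunto_palavras; decide

theorem e_conjunto_palavras_tight : Claim_exact_e_conjunto_palavras := by
  intro ws _ hD
  obtain ⟨h1, h2, h3⟩ := hD
  have hvb : ws.all (fun w => w.toList.all validChar) = true := (valid_eq_D1 ws).trans h1
  rw [a_char ws hvb, b_char, hvb, Bool.true_and]
  have hne : ws ≠ [] := by
    intro h; rw [h] at h3; simp at h3
  have : ¬ ws.Nodup := by
    intro hnd
    rcases List.eq_nil_or_concat ws with h | ⟨ys, x, rfl⟩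
    · exact hne h
    · rw [List.concat_eq_append] at h3
      rw [List.dropLast_concat, List.getLastD_concat] at h3
      rw [List.nodup_concat] at hnd
      exact hnd.1 h3
  simp [h2, this]
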